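-- pv_equiv track=rewrite | github.com/jeremycg/fake-nils | nilsim.py | introgressions
-- ===== SOURCE A (Python) =====
-- def introgressions(individ,vartocount):#function of individual, then 0 or 1
--         d=0#clears counter
--         e=[]#clears list of counts
--         for chr in individ:#for each chromosome
--                 for sister in chr:#and each sister
--                         for loci in sister:#for each locus
--                                 if loci==vartocount:#if it's a match
--                                         d+=1#increase the counter
--                                 elif loci!=vartocount:#otherwise
--                                         if d != 0:#if the counter isnt 0
--                                                 e+=[d]#add it to the list
--                                         d=0#reset the counter for next introgression
--                         if d!=0:#checks for introgression at end of chr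
--                                 e+=[d]#adds to list
--                         d=0#resets counter for next
--         return(e)#returns the list
-- ===== SOURCE B (Python) =====
-- def _runs(sister, vartocount):
--     # two-pointer scan: find the start of each matching run, then its end
--     res = []
--     i = 0
--     n = len(sister)
--     while i < n:
--         if sister[i] != vartocount:
--             i += 1
--         else:
--             j = i
--             while j < n and sister[j] == vartocount:
--                 j += 1
--             res.append(j - i)
--             i = j
--     return res
--
--
-- def introgressions(individ, vartocount):
--     return [r for chr in individ for sister in chr for r in _runs(sister, vartocount)]
-- ===== Notes on version B (the rewrite author's own statement) =====
-- stated objective: alternative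
-- what changed: Replaces A's threaded counter-and-flush accumulator (with an end-of-sister flush and reset) by a per-sister two-pointer run scanner whose results are concatenated with a comprehension; no counter state crosses loci, runs are emitted as whole index spans.
import Mathlib
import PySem

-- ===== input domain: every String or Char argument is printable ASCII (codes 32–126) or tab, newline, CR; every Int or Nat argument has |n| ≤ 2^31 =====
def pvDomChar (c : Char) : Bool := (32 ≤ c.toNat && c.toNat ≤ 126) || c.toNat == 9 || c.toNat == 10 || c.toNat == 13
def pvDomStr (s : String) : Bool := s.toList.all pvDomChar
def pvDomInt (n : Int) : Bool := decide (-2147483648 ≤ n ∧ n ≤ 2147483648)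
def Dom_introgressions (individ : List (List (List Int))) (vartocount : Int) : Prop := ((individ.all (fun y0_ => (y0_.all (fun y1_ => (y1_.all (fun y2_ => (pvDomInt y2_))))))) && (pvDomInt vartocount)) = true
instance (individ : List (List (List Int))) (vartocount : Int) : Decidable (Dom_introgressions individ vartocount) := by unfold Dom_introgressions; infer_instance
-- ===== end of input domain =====

-- B replaces A's threaded counter-and-flush accumulator by a per-sister two-pointer
-- run scanner whose outputs are concatenated (objective: alternative; same cost).


-- ===== PORT A =====
-- literal transliteration: state (d, e) threaded through all three nested loops;
-- per locus: match increments d, mismatch flushes nonzero d and resets; after each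
-- sister, nonzero d is flushed and d reset.
def introgressions (individ : List (List (List Int))) (vartocount : Int) : List Int :=
  (individ.foldl
    (fun (st : Int × List Int) chr =>
      chr.foldl
        (fun (st : Int × List Int) sister =>
          let st2 := sister.foldl
            (fun (st : Int × List Int) loci =>
              if loci = vartocount then (st.1 + 1, st.2)
              else (0, if st.1 ≠ 0 then st.2 ++ [st.1] else st.2)) st
          (0, if st2.1 ≠ 0 then st2.2 ++ [st2.1] else st2.2)) st)
    ((0 : Int), ([] : List Int))).2

-- ===== PORT B =====
-- inner `while rest and rest[0]==vartocount` of Source B: length of the matching prefix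
-- together with the remainder (the position j and the suffix from j).
def pvTake (v : Int) : List Int → Nat × List Int
  | [] => (0, [])
  | x :: xs => if x = v then ((pvTake v xs).1 + 1, (pvTake v xs).2) else (0, x :: xs)

theorem pvTake_len (v : Int) : ∀ s : List Int, (pvTake v s).2.length ≤ s.length
  | [] => by simp [pvTake]
  | x :: xs => by
    by_cases h : x = v
    · simpa [pvTake, h] using Nat.le_succ_of_le (pvTake_len v xs)
    · simp [pvTake, h]

-- outer while of Source B's _runs: skip a mismatch, or emit the span j - i and resume at j
def pvRuns (v : Int) : List Int → List Int
  | [] => []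
  | x :: xs =>
    if x = v then ((((pvTake v xs).1 + 1 : Nat) : Int)) :: pvRuns v (pvTake v xs).2
    else pvRuns v xs
termination_by s => s.length
decreasing_by
  · exact Nat.lt_succ_of_le (pvTake_len v xs)
  · simp

def introgressions_alt (individ : List (List (List Int))) (vartocount : Int) : List Int :=
  individ.flatMap (fun chr => chr.flatMap (fun sister => pvRuns vartocount sister))

-- ===== PRECONDITION & SPEC =====
def Spec_introgressions (individ : List (List (List Int))) (vartocount : Int) (out : List Int) : Prop := out = introgressions_alt individ vartocount
instance (individ : List (List (List Int))) (vartocount : Int) (out : List Int) : Decidable (Spec_introgressions individ vartocount out) := by unfold Spec_introgressions; infer_instance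

-- ===== CLAIM (what is proved, stated in full; the proofs are below) =====
def Claim_equal_introgressions : Prop := ∀ (individ : List (List (List Int))) (vartocount : Int), Dom_introgressions individ vartocount → Spec_introgressions individ vartocount (introgressions individ vartocount)

-- ===== LEMMAS AND PROOFS =====

-- characterisation of A's per-sister loop continued from a pending run of length d
def pvCont (v : Int) : Nat → List Int → List Int
  | d, [] => if d = 0 then [] else [(d : Int)]
  | d, x :: xs =>
    if x = v then pvCont v (d + 1) xs
    else (if d = 0 then [] else [(d : Int)]) ++ pvCont v 0 xs

theorem contA (v : Int) (s : List Int) : ∀ (d : Nat) (e : List Int),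
    (let st2 := s.foldl
        (fun (st : Int × List Int) loci =>
          if loci = v then (st.1 + 1, st.2)
          else (0, if st.1 ≠ 0 then st.2 ++ [st.1] else st.2)) ((d : Int), e)
      if st2.1 ≠ 0 then st2.2 ++ [st2.1] else st2.2) = e ++ pvCont v d s := by
  induction s with
  | nil =>
    intro d e
    by_cases h : d = 0 <;> simp [pvCont, h]
  | cons x xs ih =>
    intro d e
    by_cases h : x = v
    · have := ih (d + 1) e
      simpa [pvCont, h, List.foldl_cons, Int.add_comm, push_cast] using
        (by push_cast at this ⊢; simpa [Int.add_comm] using this)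
    · by_cases hd : d = 0
      · simpa [pvCont, h, hd, List.foldl_cons] using ih 0 e
      · have hdz : ((d : Int)) ≠ 0 := by exact_mod_cast hd
        have := ih 0 (e ++ [(d : Int)])
        simpa [pvCont, h, hd, hdz, List.foldl_cons, List.append_assoc] using this

theorem cont_pos (v : Int) (s : List Int) : ∀ d : Nat,
    pvCont v (d + 1) s = ((d + 1 + (pvTake v s).1 : Nat) : Int) :: pvCont v 0 (pvTake v s).2 := by
  induction s with
  | nil => intro d; simp [pvCont, pvTake]
  | cons x xs ih =>
    intro d
    by_cases h : x = v
    · simp only [pvCont, pvTake, h, if_pos]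
      rw [ih (d + 1)]
      congr 1
      push_cast
      ring
    · simp [pvCont, pvTake, h]

theorem cont0_runs (v : Int) (s : List Int) : pvCont v 0 s = pvRuns v s := by
  induction hn : s.length using Nat.strong_induction_on generalizing s with
  | _ n ih =>
    match s, hn with
    | [], _ => simp [pvCont, pvRuns]
    | x :: xs, hn =>
      simp only [List.length_cons] at hn
      by_cases h : x = v
      · rw [pvRuns]
        simp only [pvCont, h, if_pos]
        rw [cont_pos]
        have hlen : (pvTake v xs).2.length < n := by
          have := pvTake_len v xs
          omega
        rw [ih _ hlen _ rfl]
        simp [Int.add_comm]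
      · rw [pvRuns]
        simp only [pvCont, h]
        have hlen : xs.length < n := by omega
        simpa using ih _ hlen _ rfl

theorem sisterA (v : Int) (s : List Int) (e : List Int) :
    (let st2 := s.foldl
        (fun (st : Int × List Int) loci =>
          if loci = v then (st.1 + 1, st.2)
          else (0, if st.1 ≠ 0 then st.2 ++ [st.1] else st.2)) ((0 : Int), e);
      ((0 : Int), if st2.1 ≠ 0 then st2.2 ++ [st2.1] else st2.2))
    = ((0 : Int), e ++ pvRuns v s) := by
  have h := contA v s 0 e
  simp only [Nat.cast_zero] at h
  simp only [h, cont0_runs]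

theorem chrA (v : Int) (chr : List (List Int)) : ∀ e : List Int,
    chr.foldl
      (fun (st : Int × List Int) sister =>
          let st2 := sister.foldl
            (fun (st : Int × List Int) loci =>
              if loci = v then (st.1 + 1, st.2)
              else (0, if st.1 ≠ 0 then st.2 ++ [st.1] else st.2)) st
          (0, if st2.1 ≠ 0 then st2.2 ++ [st2.1] else st2.2)) ((0 : Int), e)
    = ((0 : Int), e ++ chr.flatMap (pvRuns v)) := by
  induction chr with
  | nil => intro e; simp
  | cons s rest ih =>
    intro e
    rw [List.foldl_cons]
    have hs := sisterA v s e
    simp only at hs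
    rw [hs, ih (e ++ pvRuns v s)]
    simp

theorem indA (v : Int) (individ : List (List (List Int))) : ∀ e : List Int,
    individ.foldl
      (fun (st : Int × List Int) chr =>
        chr.foldl
          (fun (st : Int × List Int) sister =>
            let st2 := sister.foldl
              (fun (st : Int × List Int) loci =>
                if loci = v then (st.1 + 1, st.2)
                else (0, if st.1 ≠ 0 then st.2 ++ [st.1] else st.2)) st
            (0, if st2.1 ≠ 0 then st2.2 ++ [st2.1] else st2.2)) st) ((0 : Int), e)
    = ((0 : Int), e ++ individ.flatMap (fun chr => chr.flatMap (pvRuns v))) := by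
  induction individ with
  | nil => intro e; simp
  | cons chr rest ih =>
    intro e
    rw [List.foldl_cons, chrA v chr e, ih (e ++ chr.flatMap (pvRuns v))]
    simp

-- ===== VERDICT (by name: the statement is the Claim_ definition above) =====
theorem introgressions_spec : Claim_equal_introgressions := by
  intro individ v _
  unfold Spec_introgressions introgressions introgressions_alt
  rw [indA v individ []]
  simp
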